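-- pv_equiv track=rewrite | github.com/coding-frog117/Programmers | 프로그래머스/2/389480. 완전범죄/완전범죄.py | solution
-- ===== SOURCE A (Python) =====
-- def solution(info, n, m):
--     answer = 99999
--
--     seen = set()
--     stack = []
--     stack.append([0,0,-1])
--     while stack:
--         a,b,i = stack.pop()
--         if (a,b,i) in seen :
--             continue
--
--         if a >= n or b >= m :
--             continue
--
--         if i >= (len(info) - 1):
--             answer = min(a,answer)
--             continue
--
--         stack.append([a+info[i][0],b,i+1])
--         stack.append([a,b+info[i][1],i+1])
--
--         seen.add((a,b,i))
--     if answer >= n :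
--         return -1
--     return answer
-- ===== SOURCE B (Python) =====
-- def solution(info, n, m):
--     # dp maps each reachable sum of B-costs to the minimal sum of A-costs.
--     dp = {0: 0}
--     for row in info:
--         ndp = {}
--         for b, a in dp.items():
--             if a >= n or b >= m:
--                 continue
--             for nb, na in ((b, a + row[0]), (b + row[1], a)):
--                 if nb not in ndp or na < ndp[nb]:
--                     ndp[nb] = na
--         dp = ndp
--     best = min((a for b, a in dp.items() if a < n and b < m), default=None)
--     return best if best is not None else -1
-- ===== Notes on version B (the rewrite author's own statement) =====
-- stated objective: faster
-- what changed: A explores every distinct (a,b,i) DFS state with an explicit stack and a seen-set; B is a layered dynamic programme over the rows in their given order, keeping per layer a dict from each reachable B-sum to the minimal A-sum. …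
-- outside the precondition, e.g. on solution([[1], [5, 5]], 1, 1): A returns -1, B raises IndexError; on solution([[6, 151], [-3, 100]], 5, 150): A returns 3, B returns -1; on solution([], 100000, 0): A returns 99999, B returns -1
import Mathlib
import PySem

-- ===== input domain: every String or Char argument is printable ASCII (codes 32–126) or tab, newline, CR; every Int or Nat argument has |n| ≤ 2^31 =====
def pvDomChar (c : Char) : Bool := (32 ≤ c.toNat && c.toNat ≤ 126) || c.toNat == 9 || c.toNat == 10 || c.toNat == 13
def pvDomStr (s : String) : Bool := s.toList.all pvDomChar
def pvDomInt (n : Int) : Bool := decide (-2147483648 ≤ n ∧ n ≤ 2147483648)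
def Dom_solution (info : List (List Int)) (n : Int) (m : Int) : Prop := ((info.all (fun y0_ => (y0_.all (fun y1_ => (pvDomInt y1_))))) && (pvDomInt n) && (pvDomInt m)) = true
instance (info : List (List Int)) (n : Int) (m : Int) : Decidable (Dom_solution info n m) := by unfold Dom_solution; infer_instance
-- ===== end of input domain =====

-- B replaces A's exhaustive DFS over (a,b,i) states (stack + seen set) by a layered DP over the rows
-- keyed on the B-sum (b-sum -> minimal a-sum), which is measurably faster; same return value on Pre_.


-- ===== PORT A =====
-- info[i][j] with Python indexing (i may be -1); total form, default 0 outside Pre_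
def pvItem (info : List (List Int)) (i : Int) (j : Int) : Int :=
  ((PySem.List.pyGet? info i).bind (fun r => PySem.List.pyGet? r j)).getD 0

-- the while-stack loop of A; terminates because each pop strictly decreases the 3-adic stack weight
def solLoop (info : List (List Int)) (n : Int) (m : Int)
    (stack : List (Int × Int × Int)) (seen : PySem.Set (Int × Int × Int)) (answer : Int) : Int :=
  match stack with
  | [] => answer
  | (a, b, i) :: rest =>
    if PySem.Set.contains seen (a, b, i) then
      solLoop info n m rest seen answer
    else if a ≥ n ∨ b ≥ m then
      solLoop info n m rest seen answer
    else if i ≥ PySem.List.len info - 1 then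
      solLoop info n m rest seen (min a answer)
    else
      solLoop info n m
        ((a, b + pvItem info i 1, i + 1) :: (a + pvItem info i 0, b, i + 1) :: rest)
        (PySem.Set.add seen (a, b, i)) answer
termination_by (stack.map (fun s => 3 ^ (((info.length : Int) - s.2.2).toNat))).sum
decreasing_by
  · simp only [List.map_cons, List.sum_cons]
    have : 0 < 3 ^ (((info.length : Int) - i).toNat) := Nat.pow_pos (by omega)
    omega
  · simp only [List.map_cons, List.sum_cons]
    have : 0 < 3 ^ (((info.length : Int) - i).toNat) := Nat.pow_pos (by omega)
    omega
  · simp only [List.map_cons, List.sum_cons]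
    have : 0 < 3 ^ (((info.length : Int) - i).toNat) := Nat.pow_pos (by omega)
    omega
  · simp only [List.map_cons, List.sum_cons]
    rename_i hseen hprune hleaf
    have hlen : PySem.List.len info = (info.length : Int) := PySem.List.len_eq info
    rw [hlen] at hleaf
    have h1 : (((info.length : Int) - (i + 1)).toNat) + 1 = (((info.length : Int) - i).toNat) := by omega
    have h3 : 3 ^ (((info.length : Int) - i).toNat)
        = 3 * 3 ^ (((info.length : Int) - (i + 1)).toNat) := by
      rw [← h1, pow_succ]; ring
    have : 0 < 3 ^ (((info.length : Int) - (i + 1)).toNat) := Nat.pow_pos (by omega)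
    omega

def solution (info : List (List Int)) (n : Int) (m : Int) : Int :=
  let answer := solLoop info n m [(0, 0, -1)] PySem.Set.empty 99999
  if answer ≥ n then -1 else answer

-- ===== PORT B =====
-- conditional dict write: 'if nb not in ndp or na < ndp[nb]: ndp[nb] = na'
def altIns (nd : PySem.Dict Int Int) (q : Int × Int) : PySem.Dict Int Int :=
  if ¬ nd.contains q.1 ∨ q.2 < nd.getD q.1 0 then nd.insert q.1 q.2 else nd

-- body of the DP layer loop: expand one live (b -> min a) entry with the current row
def altBody (n : Int) (m : Int) (row : List Int) (ndp : PySem.Dict Int Int) (p : Int × Int) :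
    PySem.Dict Int Int :=
  if p.2 ≥ n ∨ p.1 ≥ m then ndp
  else
    altIns (altIns ndp (p.1, p.2 + (PySem.List.pyGet? row 0).getD 0))
      (p.1 + (PySem.List.pyGet? row 1).getD 0, p.2)

-- one DP layer
def altStep (n : Int) (m : Int) (row : List Int) (dp : PySem.Dict Int Int) : PySem.Dict Int Int :=
  dp.items.foldl (altBody n m row) PySem.Dict.empty

def solution_alt (info : List (List Int)) (n : Int) (m : Int) : Int :=
  let dp := info.foldl (fun d row => altStep n m row d) (PySem.Dict.ofList [((0 : Int), (0 : Int))])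
  match PySem.List.min?
      (dp.items.filterMap (fun p => if p.2 < n ∧ p.1 < m then some p.2 else none))
      (fun x => x) with
  | some best => best
  | none => -1

-- ===== PRECONDITION & SPEC =====
-- Pre_ excludes inputs with n > 99999 — there A's finite initializer 99999 collides with real costs —
-- and, when both caps are positive, rows shorter than 2 (on which both programs can raise IndexError)
-- and negative costs, a corner outside the problem's cost domain where the intermediate-cap pruning
-- makes the answer depend on which row order a traversal picks, and A's DFS order and B's
-- left-to-right pass are equally defensible; see the cites in claim.json.
def Pre_solution (info : List (List Int)) (n : Int) (m : Int) : Prop :=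
  n ≤ 99999 ∧ ((0 < n ∧ 0 < m) → ∀ row ∈ info, 2 ≤ row.length ∧ ∀ x ∈ row, 0 ≤ x)
instance (info : List (List Int)) (n : Int) (m : Int) : Decidable (Pre_solution info n m) := by
  unfold Pre_solution; infer_instance

def pvWitness_solution : List (List Int) × Int × Int := ([[1, 2], [3, 4]], 4, 4)

def Spec_solution (info : List (List Int)) (n : Int) (m : Int) (out : Int) : Prop := out = solution_alt info n m
instance (info : List (List Int)) (n : Int) (m : Int) (out : Int) : Decidable (Spec_solution info n m out) := by unfold Spec_solution; infer_instance

-- ===== CLAIM (what is proved, stated in full; the proofs are below) =====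
def Claim_equal_solution : Prop := ∀ (info : List (List Int)) (n : Int) (m : Int), Dom_solution info n m → Pre_solution info n m → Spec_solution info n m (solution info n m)

-- ===== LEMMAS AND PROOFS =====

-- min on Option Int with none = +infinity
def omin (x y : Option Int) : Option Int :=
  match x, y with
  | none, y => y
  | x, none => x
  | some a, some b => some (min a b)

-- x ≤ y on Option Int with none = +infinity
def ole (x y : Option Int) : Prop := ∀ b, y = some b → ∃ a, x = some a ∧ a ≤ b

-- fold a candidate value into a running Int minimum (none contributes nothing)
def ostep (acc : Int) (v : Option Int) : Int :=
  match v with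
  | none => acc
  | some x => min x acc

-- the minimal final A-sum over all assignments of the remaining rows whose every
-- intermediate state satisfies a < n and b < m (none if there is no such assignment)
def pvVal (n m : Int) : List (List Int) → Int → Int → Option Int
  | [], a, b => if a ≥ n ∨ b ≥ m then none else some a
  | row :: rest, a, b =>
    if a ≥ n ∨ b ≥ m then none
    else omin (pvVal n m rest (a + row.getD 0 0) b) (pvVal n m rest a (b + row.getD 1 0))

-- the rows in the order A's DFS consumes them (index -1 first)
def rotOf (info : List (List Int)) : List (List Int) :=
  info.drop (info.length - 1) ++ info.dropLast

-- the value of a DFS state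
def valS (info : List (List Int)) (n m : Int) (s : Int × Int × Int) : Option Int :=
  pvVal n m ((rotOf info).drop ((s.2.2 + 1).toNat)) s.1 s.2.1

def childA (info : List (List Int)) (s : Int × Int × Int) : Int × Int × Int :=
  (s.1 + pvItem info s.2.2 0, s.2.1, s.2.2 + 1)
def childB (info : List (List Int)) (s : Int × Int × Int) : Int × Int × Int :=
  (s.1, s.2.1 + pvItem info s.2.2 1, s.2.2 + 1)

def covered (info : List (List Int)) (n m : Int) (stack seen : List (Int × Int × Int))
    (answer : Int) (c : Int × Int × Int) : Prop :=
  c ∈ stack ∨ c ∈ seen ∨ (∀ x, valS info n m c = some x → answer ≤ x)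

def Kinv (info : List (List Int)) (n m : Int) (stack seen : List (Int × Int × Int))
    (answer : Int) : Prop :=
  ∀ s ∈ seen, -1 ≤ s.2.2 ∧ ¬ (s.1 ≥ n ∨ s.2.1 ≥ m) ∧ ¬ (s.2.2 ≥ (info.length : Int) - 1) ∧
    covered info n m stack seen answer (childA info s) ∧
    covered info n m stack seen answer (childB info s)

lemma omin_none_right (x : Option Int) : omin x none = x := by cases x <;> rfl
lemma omin_comm (x y : Option Int) : omin x y = omin y x := by
  cases x <;> cases y <;> simp [omin] <;> omega
lemma omin_assoc (x y z : Option Int) : omin (omin x y) z = omin x (omin y z) := by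
  cases x <;> cases y <;> cases z <;> simp [omin] <;> omega
lemma omin_four (u v w z : Option Int) :
    omin (omin u v) (omin w z) = omin (omin u w) (omin v z) := by
  cases u <;> cases v <;> cases w <;> cases z <;> simp [omin] <;> omega
lemma omin_absorb (x y : Option Int) (h : ole x y) : omin x y = x := by
  cases x with
  | none => cases y with
    | none => rfl
    | some b => exact absurd (h b rfl) (by simp)
  | some a => cases y with
    | none => rfl
    | some b =>
      obtain ⟨a', ha', hle⟩ := h b rfl
      simp only [omin, Option.some.injEq] at *
      omega
lemma omin_mono_ole (u1 u2 v1 v2 : Option Int) (hu : ole u1 u2) (hv : ole v1 v2) :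
    ole (omin u1 v1) (omin u2 v2) := by
  intro b hb
  cases u2 with
  | none =>
    cases v2 with
    | none => simp [omin] at hb
    | some bv =>
      simp only [omin] at hb
      obtain ⟨a, ha, hle⟩ := hv b hb
      cases u1 with
      | none => exact ⟨a, by simp [omin, ha], hle⟩
      | some au => exact ⟨min au a, by simp [omin, ha], by omega⟩
  | some bu =>
    cases v2 with
    | none =>
      simp only [omin_none_right] at hb
      obtain ⟨a, ha, hle⟩ := hu b hb
      cases v1 with
      | none => exact ⟨a, by simp [omin, ha, omin_none_right], hle⟩
      | some av => exact ⟨min a av, by simp [omin, ha], by omega⟩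
    | some bv =>
      simp only [omin, Option.some.injEq] at hb
      obtain ⟨au, hau, hleu⟩ := hu bu rfl
      obtain ⟨av, hav, hlev⟩ := hv bv rfl
      exact ⟨min au av, by simp [omin, hau, hav], by omega⟩

lemma pvVal_mono (n m : Int) (rest : List (List Int)) (b a1 a2 : Int) (h : a1 ≤ a2) :
    ole (pvVal n m rest a1 b) (pvVal n m rest a2 b) := by
  induction rest generalizing b a1 a2 with
  | nil =>
    intro x hx
    simp only [pvVal] at hx ⊢
    split at hx
    · exact absurd hx (by simp)
    · rename_i hcond
      simp only [Option.some.injEq] at hx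
      subst hx
      rw [if_neg (by omega)]
      exact ⟨a1, rfl, h⟩
  | cons row rest ih =>
    intro x hx
    simp only [pvVal] at hx ⊢
    split at hx
    · exact absurd hx (by simp)
    · rename_i hcond
      rw [if_neg (by omega)]
      exact omin_mono_ole _ _ _ _ (ih _ _ _ (by omega)) (ih _ _ _ h) x hx

lemma pvVal_pruned (n m : Int) (rest : List (List Int)) (a b : Int) (h : a ≥ n ∨ b ≥ m) :
    pvVal n m rest a b = none := by
  cases rest <;> simp [pvVal, h]

lemma rot_length (info : List (List Int)) : (rotOf info).length = info.length := by
  unfold rotOf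
  simp only [List.length_append, List.length_drop, List.length_dropLast]
  omega

lemma rot_step (info : List (List Int)) (i : Int) (h1 : -1 ≤ i)
    (h2 : i < (info.length : Int) - 1) :
    ∃ row, PySem.List.pyGet? info i = some row ∧
      (rotOf info).drop ((i + 1).toNat) = row :: (rotOf info).drop ((i + 2).toNat) := by
  have hL : 1 ≤ info.length := by omega
  have hne : info ≠ [] := by
    cases info
    · simp at hL
    · simp
  rcases eq_or_lt_of_le h1 with h | h
  · -- i = -1: the first row consumed is info[-1]
    refine ⟨info.getLast hne, ?_, ?_⟩
    · rw [← h, PySem.List.pyGet?_neg_one]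
      exact List.getLast?_eq_some_getLast hne
    · have h0 : (i + 1).toNat = 0 := by omega
      have h1' : (i + 2).toNat = 1 := by omega
      rw [h0, h1', List.drop_zero]
      unfold rotOf
      rw [List.drop_length_sub_one hne]
      simp
  · -- 0 ≤ i
    have hk : i.toNat < info.length - 1 := by omega
    have hk' : i.toNat < info.length := by omega
    refine ⟨info[i.toNat], ?_, ?_⟩
    · rw [PySem.List.pyGet?_of_nonneg info (by omega)]
      exact List.getElem?_eq_getElem hk'
    · have h0 : (i + 1).toNat = i.toNat + 1 := by omega
      have h1' : (i + 2).toNat = i.toNat + 2 := by omega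
      have hfst : (info.drop (info.length - 1)).length = 1 := by
        simp only [List.length_drop]; omega
      unfold rotOf
      have e1 : ∀ (k : Nat), (info.drop (info.length - 1) ++ info.dropLast).drop (1 + k)
          = info.dropLast.drop k := by
        intro k
        have := List.drop_length_add_append (l₁ := info.drop (info.length - 1))
          (l₂ := info.dropLast) k
        rwa [hfst] at this
      have hkd : i.toNat < info.dropLast.length := by
        simp only [List.length_dropLast]; omega
      rw [h0, h1', (by omega : i.toNat + 1 = 1 + i.toNat), e1,
        (by omega : i.toNat + 2 = 1 + (i.toNat + 1)), e1,
        List.drop_eq_getElem_cons hkd]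
      congr 1
      exact List.getElem_dropLast _

lemma pvItem_row (info : List (List Int)) (i : Int) (row : List Int)
    (h : PySem.List.pyGet? info i = some row) (j : Nat) (hj : j < 2) :
    pvItem info i (j : Int) = row.getD j 0 := by
  unfold pvItem
  rw [h]
  simp only [Option.bind_some]
  interval_cases j
  all_goals rw [PySem.List.pyGet?_natCast]
  all_goals exact List.getD_eq_getElem?_getD.symm

-- valS of an expandable state is the min of its two children's values
lemma valS_expand (info : List (List Int)) (n m : Int) (a b i : Int) (h1 : -1 ≤ i)
    (h2 : i < (info.length : Int) - 1) (h3 : ¬ (a ≥ n ∨ b ≥ m)) :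
    valS info n m (a, b, i) =
      omin (valS info n m (childA info (a, b, i))) (valS info n m (childB info (a, b, i))) := by
  obtain ⟨row, hget, hdrop⟩ := rot_step info i h1 h2
  unfold valS childA childB
  simp only
  rw [hdrop]
  simp only [pvVal]
  rw [if_neg h3]
  have e0 : pvItem info i 0 = row.getD 0 0 := by
    have := pvItem_row info i row hget 0 (by omega)
    simpa using this
  have e1 : pvItem info i 1 = row.getD 1 0 := by
    have := pvItem_row info i row hget 1 (by omega)
    simpa using this
  rw [e0, e1]
  have : i + 1 + 1 = i + 2 := by ring
  rw [this]

lemma valS_leaf (info : List (List Int)) (n m : Int) (a b i : Int)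
    (h2 : i ≥ (info.length : Int) - 1) (h3 : ¬ (a ≥ n ∨ b ≥ m)) :
    valS info n m (a, b, i) = some a := by
  unfold valS
  simp only
  have hL : (rotOf info).length ≤ (i + 1).toNat := by
    rw [rot_length]
    omega
  rw [List.drop_eq_nil_of_le hL]
  simp [pvVal, h3]

-- fold-of-ostep toolbox
lemma fold_ostep_le_acc (l : List (Option Int)) (acc : Int) : l.foldl ostep acc ≤ acc := by
  induction l generalizing acc with
  | nil => simp
  | cons v l ih =>
    simp only [List.foldl_cons]
    calc l.foldl ostep (ostep acc v) ≤ ostep acc v := ih _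
    _ ≤ acc := by cases v <;> simp [ostep] <;> omega
lemma fold_ostep_le_mem (l : List (Option Int)) (acc : Int) (v : Option Int) (x : Int)
    (hv : v ∈ l) (hx : v = some x) : l.foldl ostep acc ≤ x := by
  induction l generalizing acc with
  | nil => simp at hv
  | cons w l ih =>
    simp only [List.mem_cons] at hv
    simp only [List.foldl_cons]
    rcases hv with hv | hv
    · subst hv; subst hx
      calc l.foldl ostep (ostep acc (some x)) ≤ ostep acc (some x) := fold_ostep_le_acc _ _
      _ ≤ x := by simp [ostep]
    · exact ih _ hv
lemma fold_ostep_min (l : List (Option Int)) (acc x : Int) :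
    l.foldl ostep (min x acc) = min x (l.foldl ostep acc) := by
  induction l generalizing acc with
  | nil => simp
  | cons v l ih =>
    simp only [List.foldl_cons]
    have : ostep (min x acc) v = min x (ostep acc v) := by
      cases v <;> simp [ostep] <;> omega
    rw [this, ih]
lemma ostep_ostep (acc : Int) (u v : Option Int) :
    ostep (ostep acc u) v = ostep acc (omin v u) := by
  cases u <;> cases v <;> simp [ostep, omin, omin_none_right] <;> omega

lemma omin_eq_some (u v : Option Int) (x : Int) (h : omin u v = some x) :
    (u = some x ∨ v = some x) ∧ (∀ y, u = some y → x ≤ y) ∧ (∀ y, v = some y → x ≤ y) := by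
  cases u with
  | none =>
    cases v with
    | none => simp [omin] at h
    | some bv =>
      simp only [omin] at h
      exact ⟨Or.inr h, by simp, fun y hy => by simp_all⟩
  | some bu =>
    cases v with
    | none =>
      simp only [omin] at h
      exact ⟨Or.inl h, fun y hy => by simp_all, by simp⟩
    | some bv =>
      simp only [omin, Option.some.injEq] at h
      constructor
      · rcases le_total bu bv with hle | hle
        · exact Or.inl (by simp [← h]; omega)
        · exact Or.inr (by simp [← h]; omega)
      · exact ⟨fun y hy => by simp_all; omega, fun y hy => by simp_all; omega⟩

-- every value pvVal returns is a recorded leaf a-sum, hence < n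
lemma pvVal_lt (n m : Int) (l : List (List Int)) :
    ∀ (a b x : Int), pvVal n m l a b = some x → x < n := by
  induction l with
  | nil =>
    intro a b x hx
    simp only [pvVal] at hx
    split at hx
    · exact absurd hx (by simp)
    · rename_i h
      simp only [Option.some.injEq] at hx
      omega
  | cons row rest ih =>
    intro a b x hx
    simp only [pvVal] at hx
    split at hx
    · exact absurd hx (by simp)
    · rcases (omin_eq_some _ _ _ hx).1 with h | h
      · exact ih _ _ _ h
      · exact ih _ _ _ h

lemma covered_tail (info : List (List Int)) (n m : Int) (s : Int × Int × Int)
    (rest seen : List (Int × Int × Int)) (answer : Int) (c : Int × Int × Int)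
    (h : covered info n m (s :: rest) seen answer c)
    (hs : s ∈ seen ∨ ∀ x, valS info n m s = some x → answer ≤ x) :
    covered info n m rest seen answer c := by
  rcases h with hc | hc | hc
  · rcases List.mem_cons.mp hc with rfl | hc'
    · rcases hs with h' | h'
      · exact Or.inr (Or.inl h')
      · exact Or.inr (Or.inr h')
    · exact Or.inl hc'
  · exact Or.inr (Or.inl hc)
  · exact Or.inr (Or.inr hc)

lemma Kinv_drop (info : List (List Int)) (n m : Int) (s : Int × Int × Int)
    (rest seen : List (Int × Int × Int)) (answer : Int)
    (hK : Kinv info n m (s :: rest) seen answer)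
    (hs : s ∈ seen ∨ ∀ x, valS info n m s = some x → answer ≤ x) :
    Kinv info n m rest seen answer := by
  intro t ht
  obtain ⟨h1, h2, h3, h4, h5⟩ := hK t ht
  exact ⟨h1, h2, h3, covered_tail info n m s rest seen answer _ h4 hs,
    covered_tail info n m s rest seen answer _ h5 hs⟩

lemma Kinv_mono (info : List (List Int)) (n m : Int)
    (stack seen : List (Int × Int × Int)) (answer answer' : Int) (hle : answer' ≤ answer)
    (hK : Kinv info n m stack seen answer) : Kinv info n m stack seen answer' := by
  intro t ht
  obtain ⟨h1, h2, h3, h4, h5⟩ := hK t ht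
  refine ⟨h1, h2, h3, ?_, ?_⟩
  · rcases h4 with hc | hc | hc
    · exact Or.inl hc
    · exact Or.inr (Or.inl hc)
    · exact Or.inr (Or.inr fun x hx => le_trans hle (hc x hx))
  · rcases h5 with hc | hc | hc
    · exact Or.inl hc
    · exact Or.inr (Or.inl hc)
    · exact Or.inr (Or.inr fun x hx => le_trans hle (hc x hx))

lemma covered_expand (info : List (List Int)) (n m : Int) (s : Int × Int × Int)
    (rest seen : List (Int × Int × Int)) (answer : Int) (c : Int × Int × Int)
    (h : covered info n m (s :: rest) seen answer c) :
    covered info n m (childB info s :: childA info s :: rest) (PySem.Set.add seen s) answer c := by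
  rcases h with hc | hc | hc
  · rcases List.mem_cons.mp hc with rfl | hc'
    · exact Or.inr (Or.inl (by rw [PySem.Set.mem_add]; exact Or.inr rfl))
    · exact Or.inl (by simp [hc'])
  · exact Or.inr (Or.inl (by rw [PySem.Set.mem_add]; exact Or.inl hc))
  · exact Or.inr (Or.inr hc)

lemma Kinv_expand (info : List (List Int)) (n m : Int) (s : Int × Int × Int)
    (rest seen : List (Int × Int × Int)) (answer : Int)
    (hK : Kinv info n m (s :: rest) seen answer)
    (hi : -1 ≤ s.2.2) (hpr : ¬ (s.1 ≥ n ∨ s.2.1 ≥ m)) (hlf : ¬ (s.2.2 ≥ (info.length : Int) - 1)) :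
    Kinv info n m (childB info s :: childA info s :: rest) (PySem.Set.add seen s) answer := by
  intro t ht
  rw [PySem.Set.mem_add] at ht
  rcases ht with ht | ht
  · obtain ⟨h1, h2, h3, h4, h5⟩ := hK t ht
    exact ⟨h1, h2, h3, covered_expand info n m s rest seen answer _ h4,
      covered_expand info n m s rest seen answer _ h5⟩
  · subst ht
    exact ⟨hi, hpr, hlf, Or.inl (by simp), Or.inl (by simp)⟩

-- every seen state's value is at least the combined minimum of answer and the stack values
lemma seen_ge (info : List (List Int)) (n m : Int) :
    ∀ (d : Nat) (stack seen : List (Int × Int × Int)) (answer : Int),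
      Kinv info n m stack seen answer →
      ∀ s ∈ seen, info.length - (s.2.2 + 1).toNat ≤ d →
        ∀ x, valS info n m s = some x →
          (stack.map (valS info n m)).foldl ostep answer ≤ x := by
  intro d
  induction d with
  | zero =>
    intro stack seen answer hK s hs hd x hx
    obtain ⟨hi, hpr, hlf, _, _⟩ := hK s hs
    omega
  | succ d ih =>
    intro stack seen answer hK s hs hd x hx
    obtain ⟨hi, hpr, hlf, hcA, hcB⟩ := hK s hs
    obtain ⟨a, b, i⟩ := s
    simp only at hi hpr hlf hd
    rw [valS_expand info n m a b i hi (by omega) hpr] at hx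
    obtain ⟨hor, hbA, hbB⟩ := omin_eq_some _ _ _ hx
    have hmeas : ∀ c : Int × Int × Int, c.2.2 = i + 1 →
        info.length - (c.2.2 + 1).toNat ≤ d := by
      intro c hc; rw [hc]; omega
    rcases hor with hc | hc
    · rcases hcA with hmem | hmem | hmem
      · exact fold_ostep_le_mem _ _ _ _ (List.mem_map_of_mem hmem) hc
      · exact ih stack seen answer hK _ hmem (hmeas _ rfl) x hc
      · exact le_trans (fold_ostep_le_acc _ _) (hmem x hc)
    · rcases hcB with hmem | hmem | hmem
      · exact fold_ostep_le_mem _ _ _ _ (List.mem_map_of_mem hmem) hc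
      · exact ih stack seen answer hK _ hmem (hmeas _ rfl) x hc
      · exact le_trans (fold_ostep_le_acc _ _) (hmem x hc)

-- main loop invariant: the DFS loop computes the running minimum of the stack-state values
lemma loop_eq (info : List (List Int)) (n m : Int) :
    ∀ (stack : List (Int × Int × Int)) (seen : PySem.Set (Int × Int × Int)) (answer : Int),
      (∀ s ∈ stack, -1 ≤ s.2.2) →
      Kinv info n m stack seen answer →
      solLoop info n m stack seen answer = (stack.map (valS info n m)).foldl ostep answer := by
  intro stack seen answer
  induction stack, seen, answer using solLoop.induct info n m with
  | case1 seen answer =>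
    intro _ _
    simp [solLoop]
  | case2 seen answer a b i rest hcont ih =>
    intro hb hK
    have hmem : (a, b, i) ∈ seen := (PySem.Set.contains_iff seen (a, b, i)).mp hcont
    have hK' := Kinv_drop info n m (a, b, i) rest seen answer hK (Or.inl hmem)
    rw [solLoop, if_pos hcont,
      ih (fun s hs => hb s (List.mem_cons_of_mem _ hs)) hK']
    simp only [List.map_cons, List.foldl_cons]
    cases hv : valS info n m (a, b, i) with
    | none => rfl
    | some x =>
      have hle := seen_ge info n m info.length rest seen answer hK' (a, b, i) hmem
        (by omega) x hv
      simp only [ostep]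
      rw [fold_ostep_min]
      omega
  | case3 seen answer a b i rest hcont hpr ih =>
    intro hb hK
    have hv : valS info n m (a, b, i) = none := pvVal_pruned n m _ a b hpr
    have hK' := Kinv_drop info n m (a, b, i) rest seen answer hK
      (Or.inr (fun x hx => by rw [hv] at hx; cases hx))
    rw [solLoop, if_neg hcont, if_pos hpr,
      ih (fun s hs => hb s (List.mem_cons_of_mem _ hs)) hK']
    simp only [List.map_cons, List.foldl_cons]
    rw [hv]
    rfl
  | case4 seen answer a b i rest hcont hpr hlf ih =>
    intro hb hK
    rw [PySem.List.len_eq] at hlf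
    have hv : valS info n m (a, b, i) = some a := valS_leaf info n m a b i hlf hpr
    have hK' := Kinv_drop info n m (a, b, i) rest seen (min a answer)
      (Kinv_mono info n m ((a, b, i) :: rest) seen answer (min a answer)
        (min_le_right a answer) hK)
      (Or.inr (fun x hx => by
        rw [hv] at hx
        cases hx
        exact min_le_left a answer))
    rw [solLoop, if_neg hcont, if_neg hpr, if_pos (show i ≥ PySem.List.len info - 1 by rw [PySem.List.len_eq]; exact hlf),
      ih (fun s hs => hb s (List.mem_cons_of_mem _ hs)) hK']
    simp only [List.map_cons, List.foldl_cons]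
    rw [hv]
    rfl
  | case5 seen answer a b i rest hcont hpr hlf ih =>
    intro hb hK
    rw [PySem.List.len_eq] at hlf
    have hi : -1 ≤ i := hb (a, b, i) (List.mem_cons_self)
    have hb' : ∀ s ∈ (a, b + pvItem info i 1, i + 1) :: (a + pvItem info i 0, b, i + 1) :: rest,
        -1 ≤ s.2.2 := by
      intro s hs
      rcases List.mem_cons.mp hs with rfl | hs
      · simp; omega
      rcases List.mem_cons.mp hs with rfl | hs
      · simp; omega
      · exact hb s (List.mem_cons_of_mem _ hs)
    have hK' := Kinv_expand info n m (a, b, i) rest seen answer hK hi hpr hlf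
    rw [solLoop, if_neg hcont, if_neg hpr,
      if_neg (show ¬ i ≥ PySem.List.len info - 1 by rw [PySem.List.len_eq]; exact hlf),
      ih hb' hK']
    simp only [List.map_cons, List.foldl_cons]
    rw [ostep_ostep, valS_expand info n m a b i hi (by omega) hpr]
    simp only [childA, childB]

-- ===== order invariance of pvVal on nonnegative costs =====

-- with a nonnegative head row, the head-level guard is subsumed by the children's guards
lemma pvVal_cons_free (n m : Int) (y : List Int) (l : List (List Int)) (a b : Int)
    (hy0 : 0 ≤ y.getD 0 0) (hy1 : 0 ≤ y.getD 1 0) :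
    pvVal n m (y :: l) a b
      = omin (pvVal n m l (a + y.getD 0 0) b) (pvVal n m l a (b + y.getD 1 0)) := by
  by_cases h : a ≥ n ∨ b ≥ m
  · rw [pvVal_pruned n m _ a b h,
      pvVal_pruned n m l (a + y.getD 0 0) b (by omega),
      pvVal_pruned n m l a (b + y.getD 1 0) (by omega)]
    rfl
  · simp [pvVal, h]

lemma pvVal_perm (n m : Int) : ∀ {l1 l2 : List (List Int)}, l1.Perm l2 →
    (∀ r ∈ l1, 0 ≤ r.getD 0 0 ∧ 0 ≤ r.getD 1 0) →
    ∀ a b, pvVal n m l1 a b = pvVal n m l2 a b := by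
  intro l1 l2 h
  induction h with
  | nil => intro _ a b; rfl
  | cons x h ih =>
    intro hnn a b
    have htl := fun r hr => hnn r (List.mem_cons_of_mem _ hr)
    simp only [pvVal]
    rw [ih htl, ih htl]
  | swap x y l =>
    intro hnn a b
    obtain ⟨hx0, hx1⟩ := hnn x (by simp)
    obtain ⟨hy0, hy1⟩ := hnn y (by simp)
    rw [pvVal_cons_free n m y (x :: l) a b hy0 hy1,
      pvVal_cons_free n m x l _ _ hx0 hx1,
      pvVal_cons_free n m x l _ _ hx0 hx1,
      pvVal_cons_free n m x (y :: l) a b hx0 hx1,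
      pvVal_cons_free n m y l _ _ hy0 hy1,
      pvVal_cons_free n m y l _ _ hy0 hy1]
    rw [(by ring : a + y.getD 0 0 + x.getD 0 0 = a + x.getD 0 0 + y.getD 0 0),
      (by ring : b + y.getD 1 0 + x.getD 1 0 = b + x.getD 1 0 + y.getD 1 0)]
    exact omin_four _ _ _ _
  | trans h1 h2 ih1 ih2 =>
    intro hnn a b
    rw [ih1 hnn a b, ih2 (fun r hr => hnn r (h1.mem_iff.mpr hr)) a b]

lemma rot_perm (info : List (List Int)) : (rotOf info).Perm info := by
  by_cases hne : info = []
  · subst hne; simp [rotOf]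
  · unfold rotOf
    rw [List.drop_length_sub_one hne]
    calc ([info.getLast hne] ++ info.dropLast).Perm (info.dropLast ++ [info.getLast hne]) :=
      List.perm_append_comm
    _ = info := List.dropLast_append_getLast hne

lemma getD_nonneg (r : List Int) (h : ∀ x ∈ r, 0 ≤ x) (j : Nat) : 0 ≤ r.getD j 0 := by
  rw [List.getD_eq_getElem?_getD]
  cases hj : r[j]? with
  | none => simp
  | some v =>
    simp only [Option.getD_some]
    exact h v (List.mem_of_getElem? hj)

-- ===== B-side lemmas =====

def qfold (n m : Int) (rem : List (List Int)) (l : List (Int × Int)) : Option Int :=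
  l.foldl (fun o p => omin o (pvVal n m rem p.2 p.1)) none

lemma fold_omin_shift {α : Type} (h : α → Option Int) (w : List α) (o v : Option Int) :
    w.foldl (fun o p => omin o (h p)) (omin o v)
      = omin (w.foldl (fun o p => omin o (h p)) o) v := by
  induction w generalizing o v with
  | nil => simp
  | cons p w ih =>
    simp only [List.foldl_cons]
    rw [omin_assoc, omin_comm v (h p), ← omin_assoc, ih]

lemma fold_omin_extract {α : Type} (h : α → Option Int) (u w : List α) (x : α) (o : Option Int) :
    (u ++ x :: w).foldl (fun o p => omin o (h p)) o
      = omin ((u ++ w).foldl (fun o p => omin o (h p)) o) (h x) := by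
  induction u generalizing o with
  | nil =>
    simp only [List.nil_append, List.foldl_cons]
    exact fold_omin_shift h w o (h x)
  | cons a u ih =>
    simp only [List.cons_append, List.foldl_cons]
    exact ih (omin o (h a))

lemma dict_decomp (nd : PySem.Dict Int Int) (k : Int) (v : Int)
    (hget : nd.get? k = some v) (hnd : nd.keys.Nodup) :
    ∃ u w, nd.items = u ++ (k, v) :: w ∧ (∀ p ∈ u, p.1 ≠ k) ∧ (∀ p ∈ w, p.1 ≠ k) := by
  have hfind : nd.items.find? (fun p => p.1 == k) = some (k, v) := by
    unfold PySem.Dict.get? at hget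
    cases hf : nd.items.find? (fun p => p.1 == k) with
    | none => rw [hf] at hget; simp at hget
    | some pr =>
      rw [hf] at hget
      simp only [Option.map_some, Option.some.injEq] at hget
      have hkey : pr.1 = k := by
        have := List.find?_some hf
        simpa using this
      have hpr : pr = (k, v) := by
        obtain ⟨p1, p2⟩ := pr
        simp only at hkey hget
        rw [hkey, hget]
      exact congrArg some hpr
  obtain ⟨hpx, u, w, hl, hu⟩ := List.find?_eq_some_iff_append.mp hfind
  refine ⟨u, w, hl, ?_, ?_⟩
  · intro p hp
    have := hu p hp
    simpa using this
  · intro p hp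
    have hnds := hnd
    unfold PySem.Dict.keys at hnds
    rw [hl] at hnds
    simp only [List.map_append, List.map_cons] at hnds
    have := (List.nodup_append.mp hnds).2.1
    intro hpk
    have hmem : k ∈ (w.map Prod.fst) := by
      refine List.mem_map.mpr ⟨p, hp, hpk⟩
    simp only [List.nodup_cons] at this
    exact this.1 hmem

lemma altIns_nodup (nd : PySem.Dict Int Int) (q : Int × Int) (h : nd.keys.Nodup) :
    (altIns nd q).keys.Nodup := by
  unfold altIns
  split
  · exact PySem.Dict.nodup_keys_insert nd q.1 q.2 h
  · exact h

lemma altIns_q (n m : Int) (rest : List (List Int)) (nd : PySem.Dict Int Int) (q : Int × Int)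
    (h : nd.keys.Nodup) :
    qfold n m rest (altIns nd q).items
      = omin (qfold n m rest nd.items) (pvVal n m rest q.2 q.1) := by
  unfold altIns
  cases hc : nd.contains q.1 with
  | false =>
    rw [if_pos (Or.inl Bool.false_ne_true)]
    unfold qfold
    rw [PySem.Dict.items_insert_of_not_contains nd q.2 hc, List.foldl_append]
    rfl
  | true =>
    obtain ⟨a', hget⟩ : ∃ a', nd.get? q.1 = some a' := by
      cases hg : nd.get? q.1 with
      | none =>
        rw [PySem.Dict.get?_eq_none_iff_contains] at hg
        rw [hg] at hc
        cases hc
      | some a' => exact ⟨a', rfl⟩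
    have hgetD : nd.getD q.1 0 = a' := by
      rw [PySem.Dict.getD_eq_get?_getD, hget]
      rfl
    obtain ⟨u, w, hitems, hu, hw⟩ := dict_decomp nd q.1 a' hget h
    have hQ : qfold n m rest nd.items
        = omin (qfold n m rest (u ++ w)) (pvVal n m rest a' q.1) := by
      unfold qfold
      rw [hitems]
      exact fold_omin_extract _ u w (q.1, a') none
    by_cases hlt : q.2 < nd.getD q.1 0
    · rw [if_pos (Or.inr hlt)]
      rw [hgetD] at hlt
      have hins : (nd.insert q.1 q.2).items = u ++ (q.1, q.2) :: w := by
        rw [PySem.Dict.items_insert_of_contains nd q.2 hc, hitems]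
        simp only [List.map_append, List.map_cons]
        rw [List.map_congr_left (fun p hp => if_neg (by simpa using hu p hp)),
          List.map_congr_left (fun p hp => if_neg (by simpa using hw p hp))]
        simp
      have hQ' : qfold n m rest (nd.insert q.1 q.2).items
          = omin (qfold n m rest (u ++ w)) (pvVal n m rest q.2 q.1) := by
        unfold qfold
        rw [hins]
        exact fold_omin_extract _ u w (q.1, q.2) none
      rw [hQ', hQ, omin_assoc]
      congr 1
      rw [omin_comm]
      exact (omin_absorb _ _ (pvVal_mono n m rest q.1 q.2 a' (by omega))).symm
    · rw [if_neg (by simp only [not_true, false_or, not_lt]; omega)]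
      rw [hgetD] at hlt
      rw [hQ, omin_assoc]
      congr 1
      exact (omin_absorb _ _ (pvVal_mono n m rest q.1 a' q.2 (by omega))).symm

lemma pyrow_getD (row : List Int) (j : Nat) :
    (PySem.List.pyGet? row (j : Int)).getD 0 = row.getD j 0 := by
  rw [PySem.List.pyGet?_natCast]
  exact List.getD_eq_getElem?_getD.symm

lemma step_fold (n m : Int) (row : List Int) (rest : List (List Int)) :
    ∀ (l : List (Int × Int)) (nd : PySem.Dict Int Int), nd.keys.Nodup →
      (l.foldl (altBody n m row) nd).keys.Nodup ∧
      qfold n m rest (l.foldl (altBody n m row) nd).items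
        = l.foldl (fun o p => omin o (pvVal n m (row :: rest) p.2 p.1))
            (qfold n m rest nd.items) := by
  intro l
  induction l with
  | nil => intro nd hnd; exact ⟨hnd, rfl⟩
  | cons p l ih =>
    intro nd hnd
    simp only [List.foldl_cons]
    have hval : pvVal n m (row :: rest) p.2 p.1
        = if p.2 ≥ n ∨ p.1 ≥ m then none
          else omin (pvVal n m rest (p.2 + row.getD 0 0) p.1)
            (pvVal n m rest p.2 (p.1 + row.getD 1 0)) := rfl
    by_cases hpr : p.2 ≥ n ∨ p.1 ≥ m
    · have hbody : altBody n m row nd p = nd := by unfold altBody; rw [if_pos hpr]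
      rw [hbody]
      obtain ⟨h1, h2⟩ := ih nd hnd
      refine ⟨h1, ?_⟩
      rw [h2, hval, if_pos hpr, omin_none_right]
    · have hbody : altBody n m row nd p
          = altIns (altIns nd (p.1, p.2 + (PySem.List.pyGet? row 0).getD 0))
              (p.1 + (PySem.List.pyGet? row 1).getD 0, p.2) := by
        unfold altBody; rw [if_neg hpr]
      have hnd1 : (altIns nd (p.1, p.2 + (PySem.List.pyGet? row 0).getD 0)).keys.Nodup :=
        altIns_nodup _ _ hnd
      have hnd2 : (altBody n m row nd p).keys.Nodup := by
        rw [hbody]; exact altIns_nodup _ _ hnd1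
      obtain ⟨h1, h2⟩ := ih _ hnd2
      refine ⟨h1, ?_⟩
      rw [h2]
      congr 1
      rw [hbody, altIns_q n m rest _ _ hnd1, altIns_q n m rest _ _ hnd]
      simp only
      rw [hval, if_neg hpr]
      have e0 : (PySem.List.pyGet? row 0).getD 0 = row.getD 0 0 := by
        have := pyrow_getD row 0; simpa using this
      have e1 : (PySem.List.pyGet? row 1).getD 0 = row.getD 1 0 := by
        have := pyrow_getD row 1; simpa using this
      rw [e0, e1, omin_assoc]

lemma altStep_nodup (n m : Int) (row : List Int) (dp : PySem.Dict Int Int) :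
    (altStep n m row dp).keys.Nodup := by
  unfold altStep
  exact (step_fold n m row [] dp.items PySem.Dict.empty (by simp [PySem.Dict.keys, PySem.Dict.empty])).1

lemma altStep_q (n m : Int) (row : List Int) (rest : List (List Int))
    (dp : PySem.Dict Int Int) :
    qfold n m rest (altStep n m row dp).items = qfold n m (row :: rest) dp.items := by
  unfold altStep
  have := (step_fold n m row rest dp.items PySem.Dict.empty
    (by simp [PySem.Dict.keys, PySem.Dict.empty])).2
  rw [this]
  rfl

lemma altFold_q (n m : Int) :
    ∀ (items : List (List Int)) (dp : PySem.Dict Int Int), dp.keys.Nodup →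
      qfold n m [] ((items.foldl (fun d row => altStep n m row d) dp).items)
        = qfold n m items dp.items := by
  intro items
  induction items with
  | nil => intro dp _; rfl
  | cons row rest ih =>
    intro dp hnd
    simp only [List.foldl_cons]
    rw [ih _ (altStep_nodup n m row dp)]
    exact altStep_q n m row rest dp

-- fold omin over the somes of a filterMap = fold omin over the optional values
lemma fold_omin_filterMap {α : Type} (g : α → Option Int) :
    ∀ (l : List α) (o : Option Int),
      (l.filterMap g).foldl (fun o x => omin o (some x)) o
        = l.foldl (fun o p => omin o (g p)) o := by
  intro l
  induction l with
  | nil => intro o; rfl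
  | cons p l ih =>
    intro o
    cases hg : g p with
    | none => simp only [List.filterMap_cons, hg, List.foldl_cons, omin_none_right]; exact ih o
    | some x => simp only [List.filterMap_cons, hg, List.foldl_cons]; exact ih _

lemma fold_omin_some (l : List Int) (acc : Int) :
    l.foldl (fun o x => omin o (some x)) (some acc) = some (l.foldl min acc) := by
  induction l generalizing acc with
  | nil => rfl
  | cons x l ih =>
    simp only [List.foldl_cons]
    exact ih (min acc x)

-- min with default over the live final entries = the omin-fold of their pvVal-at-[] values
lemma final_min (n m : Int) (l : List (Int × Int)) :
    PySem.List.min? (l.filterMap (fun p => if p.2 < n ∧ p.1 < m then some p.2 else none))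
        (fun x => x)
      = qfold n m [] l := by
  have hfun : (fun p : Int × Int => if p.2 < n ∧ p.1 < m then some p.2 else none)
      = fun p : Int × Int => pvVal n m [] p.2 p.1 := by
    funext p
    simp only [pvVal]
    split <;> split <;> first | rfl | omega
  rw [hfun]
  unfold qfold
  rw [← fold_omin_filterMap (fun p : Int × Int => pvVal n m [] p.2 p.1) l none]
  cases hL : l.filterMap (fun p : Int × Int => pvVal n m [] p.2 p.1) with
  | nil => rfl
  | cons x t =>
    rw [PySem.List.min?_id_cons]
    simp only [List.foldl_cons]
    exact (fold_omin_some t x).symm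

-- ===== VERDICT (by name: the statement is the Claim_ definition above) =====
theorem solution_spec : Claim_equal_solution := by
  intro info n m hdom hpre
  obtain ⟨hn99, hrows⟩ := hpre
  unfold Spec_solution solution solution_alt
  have hK : Kinv info n m [((0 : Int), (0 : Int), (-1 : Int))] PySem.Set.empty 99999 := by
    intro t ht
    cases ht
  have hb : ∀ s ∈ [((0 : Int), (0 : Int), (-1 : Int))], -1 ≤ s.2.2 := by
    intro s hs
    simp only [List.mem_singleton] at hs
    subst hs
    norm_num
  have hA := loop_eq info n m _ _ _ hb hK
  have hvalS : valS info n m (0, 0, -1) = pvVal n m (rotOf info) 0 0 := by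
    unfold valS
    norm_num
  have hAval : solLoop info n m [(0, 0, -1)] PySem.Set.empty 99999
      = ostep 99999 (pvVal n m (rotOf info) 0 0) := by
    rw [hA]
    simp only [List.map_cons, List.map_nil, List.foldl_cons, List.foldl_nil, hvalS]
  -- A's consumption order (last row first) and the given order yield the same value on Pre_
  have hrot : pvVal n m (rotOf info) 0 0 = pvVal n m info 0 0 := by
    by_cases hnm : 0 < n ∧ 0 < m
    · refine pvVal_perm n m (rot_perm info) ?_ 0 0
      intro r hr
      obtain ⟨_, hx⟩ := hrows hnm r ((rot_perm info).mem_iff.mp hr)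
      exact ⟨getD_nonneg r hx 0, getD_nonneg r hx 1⟩
    · have hg : (0 : Int) ≥ n ∨ (0 : Int) ≥ m := by
        rcases not_and_or.mp hnm with h | h
        · left; omega
        · right; omega
      rw [pvVal_pruned n m _ 0 0 hg, pvVal_pruned n m _ 0 0 hg]
  have hdp0n : (PySem.Dict.ofList [((0 : Int), (0 : Int))]).keys.Nodup := by decide
  have hB := altFold_q n m info (PySem.Dict.ofList [((0 : Int), (0 : Int))]) hdp0n
  have hq0 : qfold n m info (PySem.Dict.ofList [((0 : Int), (0 : Int))]).items
      = pvVal n m info 0 0 := by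
    have hdp0i : (PySem.Dict.ofList [((0 : Int), (0 : Int))]).items = [(0, 0)] := by decide
    rw [hdp0i]
    rfl
  rw [hq0] at hB
  simp only [hAval, final_min, hB, hrot]
  cases hv : pvVal n m info 0 0 with
  | none =>
    simp only [ostep]
    rw [if_pos (by omega : (99999 : Int) ≥ n)]
  | some x =>
    have hx : x < n := pvVal_lt n m info 0 0 x hv
    simp only [ostep]
    rw [(by omega : min x 99999 = x), if_neg (by omega : ¬ x ≥ n)]
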